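-- pv_equiv track=rewrite | github.com/sjha92865/dsa_kunal | maze .py | ListprintPathsEndofMaze
-- ===== SOURCE A (Python) =====
-- def ListprintPathsEndofMaze(P,r,c):
--
--     L=[]
--     if r==1 and c==1:
--         l=[]
--
--         l.append(P)
--
--         return l
--     if  c>1 and r>1:
--         L.extend(ListprintPathsEndofMaze(P+"D",r-1,c-1))#Diagonal
--     if  c>1:
--         L.extend(ListprintPathsEndofMaze(P+"H",r,c-1))#Horizontal
--     if  r>1:
--         L.extend(ListprintPathsEndofMaze(P+"V",r-1,c))#Vertical
--     return L
-- ===== SOURCE B (Python) =====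
-- def ListprintPathsEndofMaze(P, r, c):
--     # Bottom-up DP: prev holds, for the previous row i-1, the list of
--     # move-suffix lists from each cell (i-1, j) down to (1,1).
--     if r < 1 or c < 1:
--         return []
--     prev = []
--     for i in range(1, r + 1):
--         row = []
--         for j in range(1, c + 1):
--             if i == 1 and j == 1:
--                 cell = [""]
--             else:
--                 cell = []
--                 if i > 1 and j > 1:
--                     cell += ["D" + s for s in prev[j - 2]]
--                 if j > 1:
--                     cell += ["H" + s for s in row[-1]]
--                 if i > 1:
--                     cell += ["V" + s for s in prev[j - 1]]
--             row.append(cell)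
--         prev = row
--     return [P + s for s in prev[-1]]
-- ===== Notes on version B (the rewrite author's own statement) =====
-- stated objective: alternative
-- what changed: Replaced the branching recursion with an iterative bottom-up dynamic-programming fill of a row of suffix lists (keeping only the previous row), prefixing P once at the end instead of threading it through recursive calls.
import Mathlib
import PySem

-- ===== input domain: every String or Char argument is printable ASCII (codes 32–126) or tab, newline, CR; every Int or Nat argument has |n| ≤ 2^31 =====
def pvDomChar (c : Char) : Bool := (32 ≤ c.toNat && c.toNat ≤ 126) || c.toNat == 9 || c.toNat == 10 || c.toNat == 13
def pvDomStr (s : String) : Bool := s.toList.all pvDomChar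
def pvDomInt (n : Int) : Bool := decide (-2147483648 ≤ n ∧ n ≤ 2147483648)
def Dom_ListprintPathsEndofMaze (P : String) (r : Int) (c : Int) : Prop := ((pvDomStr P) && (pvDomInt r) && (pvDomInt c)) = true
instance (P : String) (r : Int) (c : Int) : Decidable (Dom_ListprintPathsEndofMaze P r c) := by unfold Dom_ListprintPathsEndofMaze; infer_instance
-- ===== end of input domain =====

-- B replaces A's recursion by an iterative bottom-up DP over a row of suffix lists (alternative decomposition, same cost).

-- ===== PORT A =====
def ListprintPathsEndofMaze (P : String) (r : Int) (c : Int) : List String :=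
  if r = 1 ∧ c = 1 then [P]
  else
    (if 1 < c ∧ 1 < r then ListprintPathsEndofMaze (P ++ "D") (r - 1) (c - 1) else []) ++
    (if 1 < c then ListprintPathsEndofMaze (P ++ "H") r (c - 1) else []) ++
    (if 1 < r then ListprintPathsEndofMaze (P ++ "V") (r - 1) c else [])
termination_by r.toNat + c.toNat
decreasing_by all_goals omega

-- ===== PORT B =====
-- one cell of the DP row: suffixes from cell (i, j) down to (1,1)
def pvCell (i j : Nat) (prev row : List (List String)) : List String :=
  if i = 1 ∧ j = 1 then [""]
  else
    (if 1 < i ∧ 1 < j then (prev.getD (j - 2) []).map (fun s => "D" ++ s) else []) ++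
    (if 1 < j then (row.getLast?.getD []).map (fun s => "H" ++ s) else []) ++
    (if 1 < i then (prev.getD (j - 1) []).map (fun s => "V" ++ s) else [])

-- inner loop: for j in range(1, jmax+1): row.append(cell)
def pvRowGo (i : Nat) (prev row : List (List String)) (j jmax : Nat) : List (List String) :=
  if jmax < j then row
  else pvRowGo i prev (row ++ [pvCell i j prev row]) (j + 1) jmax
termination_by jmax + 1 - j

-- outer loop: for i in range(1, imax+1): prev = row built from prev
def pvRowsGo (i : Nat) (prev : List (List String)) (imax c : Nat) : List (List String) :=
  if imax < i then prev
  else pvRowsGo (i + 1) (pvRowGo i prev [] 1 c) imax c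
termination_by imax + 1 - i

def ListprintPathsEndofMaze_alt (P : String) (r : Int) (c : Int) : List String :=
  if r < 1 ∨ c < 1 then []
  else ((pvRowsGo 1 [] r.toNat c.toNat).getLast?.getD []).map (fun s => P ++ s)

-- ===== PRECONDITION & SPEC =====
-- Pre_ excludes exactly the inputs on which A raises RecursionError: A descends one call per
-- unit of r above 1 plus one per unit of c above 1 (even when the other coordinate is < 1, it
-- still recurses that dimension down to 1 before returning []), so it raises precisely when
-- max r 1 + max c 1 reaches 10000 under the interpreter's recursion limit of 10000; at 9999 A
-- still returns and is admitted.
def Pre_ListprintPathsEndofMaze (P : String) (r : Int) (c : Int) : Prop := max r 1 + max c 1 ≤ 9999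
instance (P : String) (r : Int) (c : Int) : Decidable (Pre_ListprintPathsEndofMaze P r c) := by unfold Pre_ListprintPathsEndofMaze; infer_instance
def pvWitness_ListprintPathsEndofMaze : String × Int × Int := ("", 2, 3)
def Spec_ListprintPathsEndofMaze (P : String) (r : Int) (c : Int) (out : List String) : Prop := out = ListprintPathsEndofMaze_alt P r c
instance (P : String) (r : Int) (c : Int) (out : List String) : Decidable (Spec_ListprintPathsEndofMaze P r c out) := by unfold Spec_ListprintPathsEndofMaze; infer_instance

-- ===== CLAIM (what is proved, stated in full; the proofs are below) =====
def Claim_equal_ListprintPathsEndofMaze : Prop := ∀ (P : String) (r : Int) (c : Int), Dom_ListprintPathsEndofMaze P r c → Pre_ListprintPathsEndofMaze P r c → Spec_ListprintPathsEndofMaze P r c (ListprintPathsEndofMaze P r c)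

-- ===== LEMMAS AND PROOFS =====

-- proof-side abbreviation: A's suffix enumeration with empty prefix, at Nat coordinates
def pvT (i j : Nat) : List String := ListprintPathsEndofMaze "" (i : Int) (j : Int)

lemma A_nil (n : Nat) : ∀ (P : String) (r c : Int), r.toNat + c.toNat ≤ n → (r < 1 ∨ c < 1) →
    ListprintPathsEndofMaze P r c = [] := by
  induction n with
  | zero =>
    intro P r c hn h
    rw [ListprintPathsEndofMaze]
    have h1 : ¬ (r = 1 ∧ c = 1) := by omega
    have h3 : ¬ (1 < c) := by omega
    have h4 : ¬ (1 < r) := by omega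
    simp [h1, h3, h4]
  | succ n ih =>
    intro P r c hn h
    rw [ListprintPathsEndofMaze]
    have h1 : ¬ (r = 1 ∧ c = 1) := by omega
    by_cases h3 : 1 < c <;> by_cases h4 : 1 < r <;>
      simp only [h1, h3, h4, and_true, true_and, and_false, false_and, if_true, if_false,
        List.append_nil, List.nil_append]
    · omega
    · rw [ih _ r (c - 1) (by omega) (by omega)]
    · rw [ih _ (r - 1) c (by omega) (by omega)]

lemma comp_pre (P m : String) (L : List String) :
    (L.map (fun s => ("" ++ m) ++ s)).map (fun s => P ++ s) = L.map (fun s => (P ++ m) ++ s) := by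
  rw [List.map_map]
  apply List.map_congr_left
  intro s _
  simp [String.append_assoc]

lemma A_hom (n : Nat) : ∀ (r c : Int), r.toNat + c.toNat ≤ n → ∀ (P : String),
    ListprintPathsEndofMaze P r c = (ListprintPathsEndofMaze "" r c).map (fun s => P ++ s) := by
  induction n with
  | zero =>
    intro r c hn P
    conv_lhs => rw [ListprintPathsEndofMaze]
    conv_rhs => rw [ListprintPathsEndofMaze]
    have h1 : ¬ (r = 1 ∧ c = 1) := by omega
    have h3 : ¬ (1 < c) := by omega
    have h4 : ¬ (1 < r) := by omega
    simp [h1, h3, h4]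
  | succ n ih =>
    intro r c hn P
    conv_lhs => rw [ListprintPathsEndofMaze]
    conv_rhs => rw [ListprintPathsEndofMaze]
    by_cases h1 : r = 1 ∧ c = 1
    · simp [h1]
    · by_cases h3 : 1 < c <;> by_cases h4 : 1 < r <;>
        simp only [h1, h3, h4, and_true, true_and, and_false, false_and, if_true, if_false,
          List.map_append, List.map_nil, List.append_nil, List.nil_append]
      · rw [ih (r - 1) (c - 1) (by omega) (P ++ "D"), ih (r - 1) (c - 1) (by omega) ("" ++ "D"),
          ih r (c - 1) (by omega) (P ++ "H"), ih r (c - 1) (by omega) ("" ++ "H"),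
          ih (r - 1) c (by omega) (P ++ "V"), ih (r - 1) c (by omega) ("" ++ "V")]
        rw [comp_pre, comp_pre, comp_pre]
      · rw [ih r (c - 1) (by omega) (P ++ "H"), ih r (c - 1) (by omega) ("" ++ "H")]
        rw [comp_pre]
      · rw [ih (r - 1) c (by omega) (P ++ "V"), ih (r - 1) c (by omega) ("" ++ "V")]
        rw [comp_pre]

lemma A_hom' (P : String) (r c : Int) :
    ListprintPathsEndofMaze P r c = (ListprintPathsEndofMaze "" r c).map (fun s => P ++ s) :=
  A_hom (r.toNat + c.toNat) r c le_rfl P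

lemma hom_empty (m : String) (r c : Int) :
    ListprintPathsEndofMaze ("" ++ m) r c = (ListprintPathsEndofMaze "" r c).map (fun s => m ++ s) := by
  rw [A_hom' ("" ++ m)]
  apply List.map_congr_left
  intro s _
  simp

-- the recurrence A's suffix sets satisfy, at Nat coordinates
lemma T_unfold (i j : Nat) (hi : 1 ≤ i) (hj : 1 ≤ j) : pvT i j =
    if i = 1 ∧ j = 1 then [""]
    else
      (if 1 < i ∧ 1 < j then (pvT (i - 1) (j - 1)).map (fun s => "D" ++ s) else []) ++
      (if 1 < j then (pvT i (j - 1)).map (fun s => "H" ++ s) else []) ++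
      (if 1 < i then (pvT (i - 1) j).map (fun s => "V" ++ s) else []) := by
  unfold pvT
  conv_lhs => rw [ListprintPathsEndofMaze]
  by_cases h1 : i = 1 ∧ j = 1
  · have h1' : ((i : Int) = 1 ∧ (j : Int) = 1) := by omega
    simp [h1, h1']
  · have h1' : ¬ ((i : Int) = 1 ∧ (j : Int) = 1) := by omega
    by_cases h3 : 1 < j <;> by_cases h4 : 1 < i
    · have h3' : (1 : Int) < (j : Int) := by omega
      have h4' : (1 : Int) < (i : Int) := by omega
      have ci : ((i : Int) - 1) = ((i - 1 : Nat) : Int) := by omega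
      have cj : ((j : Int) - 1) = ((j - 1 : Nat) : Int) := by omega
      simp only [h1, h1', h3, h4, h3', h4', and_true, true_and, if_true, if_false,
        ci, cj, hom_empty]
    · have h3' : (1 : Int) < (j : Int) := by omega
      have h4' : ¬ ((1 : Int) < (i : Int)) := by omega
      have cj : ((j : Int) - 1) = ((j - 1 : Nat) : Int) := by omega
      simp only [h1, h1', h3, h4, h3', h4', and_true, true_and, and_false, false_and,
        if_true, if_false, cj, hom_empty]
    · have h3' : ¬ ((1 : Int) < (j : Int)) := by omega
      have h4' : (1 : Int) < (i : Int) := by omega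
      have ci : ((i : Int) - 1) = ((i - 1 : Nat) : Int) := by omega
      simp only [h1, h1', h3, h4, h3', h4', and_true, true_and, and_false, false_and,
        if_true, if_false, ci, hom_empty]
    · have h3' : ¬ ((1 : Int) < (j : Int)) := by omega
      have h4' : ¬ ((1 : Int) < (i : Int)) := by omega
      simp only [h1, h1', h3, h4, h3', h4', and_false, false_and, if_false]

lemma getD_map_range' (f : Nat → List String) (c k : Nat) (h : k < c) :
    ((List.range' 1 c).map f).getD k [] = f (1 + k) := by
  rw [List.getD_eq_getElem?_getD, List.getElem?_map, List.getElem?_range' (by simpa using h)]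
  simp

lemma getLast_map_range' (f : Nat → List String) (c : Nat) (hc : 1 ≤ c) :
    ((List.range' 1 c).map f).getLast?.getD [] = f c := by
  obtain ⟨c', rfl⟩ : ∃ c', c = c' + 1 := ⟨c - 1, by omega⟩
  rw [List.range'_concat, List.map_append]
  simp [Nat.add_comm]

lemma rowGo_inv (i c : Nat) (hi : 1 ≤ i)
    (prev : List (List String))
    (hprev : 1 < i → prev = (List.range' 1 c).map (fun k => pvT (i - 1) k)) :
    ∀ (n j : Nat), c + 1 - j = n → 1 ≤ j → j ≤ c + 1 →
    pvRowGo i prev ((List.range' 1 (j - 1)).map (fun k => pvT i k)) j c =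
      (List.range' 1 c).map (fun k => pvT i k) := by
  intro n
  induction n with
  | zero =>
    intro j hn h1 h2
    have hj : j = c + 1 := by omega
    rw [pvRowGo]
    simp [hj]
  | succ n ih =>
    intro j hn h1 h2
    have hjc : j ≤ c := by omega
    rw [pvRowGo]
    have hlt : ¬ (c < j) := by omega
    simp only [hlt, if_false]
    have hcell : pvCell i j prev ((List.range' 1 (j - 1)).map (fun k => pvT i k)) = pvT i j := by
      rw [pvCell, T_unfold i j hi h1]
      by_cases hb : i = 1 ∧ j = 1
      · simp [hb]
      · simp only [hb, if_false]
        by_cases hH : 1 < j <;> by_cases hV : 1 < i <;>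
          simp only [hH, hV, and_true, true_and, and_false, false_and, if_true, if_false,
            List.append_nil, List.nil_append]
        · rw [hprev hV, getD_map_range' _ _ _ (by omega), getD_map_range' _ _ _ (by omega),
            getLast_map_range' _ _ (by omega)]
          have e1 : 1 + (j - 2) = j - 1 := by omega
          have e2 : 1 + (j - 1) = j := by omega
          rw [e1, e2]
        · rw [getLast_map_range' _ _ (by omega)]
        · rw [hprev hV, getD_map_range' _ _ _ (by omega)]
          have e2 : 1 + (j - 1) = j := by omega
          rw [e2]
    rw [hcell]
    have hrow : ((List.range' 1 (j - 1)).map (fun k => pvT i k)) ++ [pvT i j] =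
        (List.range' 1 ((j + 1) - 1)).map (fun k => pvT i k) := by
      obtain ⟨j', rfl⟩ : ∃ j', j = j' + 1 := ⟨j - 1, by omega⟩
      simp [List.range'_concat, Nat.add_comm]
    rw [hrow]
    exact ih (j + 1) (by omega) (by omega) (by omega)

lemma rowsGo_inv (r c : Nat) (hr : 1 ≤ r) (hc : 1 ≤ c) :
    ∀ (n i : Nat) (prev : List (List String)), r + 1 - i = n → 1 ≤ i → i ≤ r + 1 →
    (1 < i → prev = (List.range' 1 c).map (fun k => pvT (i - 1) k)) →
    pvRowsGo i prev r c = (List.range' 1 c).map (fun k => pvT r k) := by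
  intro n
  induction n with
  | zero =>
    intro i prev hn h1 h2 hprev
    have hi : i = r + 1 := by omega
    subst hi
    rw [pvRowsGo]
    simp only [Nat.lt_succ_self, if_true]
    simpa using hprev (by omega)
  | succ n ih =>
    intro i prev hn h1 h2 hprev
    rw [pvRowsGo]
    have hlt : ¬ (r < i) := by omega
    simp only [hlt, if_false]
    have hrow : pvRowGo i prev [] 1 c = (List.range' 1 c).map (fun k => pvT i k) := by
      have h := rowGo_inv i c h1 prev hprev c 1 (by omega) (by omega) (by omega)
      simpa using h
    exact ih (i + 1) _ (by omega) (by omega) (by omega) (fun _ => by rw [hrow]; simp)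

-- ===== VERDICT (by name: the statement is the Claim_ definition above) =====
theorem ListprintPathsEndofMaze_spec : Claim_equal_ListprintPathsEndofMaze := by
  intro P r c _ _
  unfold Spec_ListprintPathsEndofMaze ListprintPathsEndofMaze_alt
  by_cases h : r < 1 ∨ c < 1
  · simp only [h, if_true]
    exact A_nil (r.toNat + c.toNat) P r c le_rfl h
  · simp only [h, if_false]
    have hrn : 1 ≤ r.toNat := by omega
    have hcn : 1 ≤ c.toNat := by omega
    rw [rowsGo_inv r.toNat c.toNat hrn hcn r.toNat 1 [] (by omega) le_rfl (by omega) (by omega)]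
    rw [getLast_map_range' _ _ hcn]
    rw [A_hom' P r c]
    congr 1
    unfold pvT
    congr 1 <;> omega
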